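-- pv_equiv track=rewrite | github.com/mechauk418/BOJ | 프로그래머스/unrated/150367. 표현 가능한 이진트리/표현 가능한 이진트리.py | solution
-- ===== SOURCE A (Python) =====
-- def check_str(string):
--     if len(string)==1:
--         return True
--
--     left = string[: len(string) // 2]
--     right = string[ (len(string) // 2)+1:]
--
--     if len(string)==3:
--         if string == '000':
--             return True
--         elif string[1] == '1':
--             return True
--         else:
--             return False
--
--     if string[len(string)//2] == '1':
--         if check_str(left) and check_str(right):
--             return True
--         else:
--             return False
--
--     if string[len(string)//2] == '0':
--         if '1' not in left and '1' not in right: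
--             return True
--
-- def ischeck(n):
--     return (n & (n-1)) ==0
--
-- def solution(numbers):
--     answer = []
--
--     for i in numbers:
--         bin_num = bin(i)[2:]
--         while not ischeck(len(bin_num)+1):
--             bin_num = '0' + bin_num
--
--         if check_str(bin_num):
--             answer.append(1)
--         else:
--             answer.append(0)
--
--     return answer
-- ===== SOURCE B (Python) =====
-- # B: single bottom-up recursion returning (valid, has_one), so the repeated
-- # "'1' in substring" scans of A disappear; padding is computed arithmetically
-- # in one step instead of prepending '0' one at a time.
--
-- def _scan(s):
--     # returns (tree is representable, '1' occurs in s)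
--     if len(s) == 1:
--         return (True, s == '1')
--     if len(s) == 3:
--         return (s == '000' or s[1] == '1', '1' in s)
--     m = len(s) // 2
--     lv, lo = _scan(s[:m])
--     rv, ro = _scan(s[m + 1:])
--     c = s[m]
--     if c == '1':
--         v = lv and rv
--     elif c == '0':
--         v = not lo and not ro
--     else:
--         v = False
--     return (v, lo or ro or c == '1')
--
-- def solution(numbers):
--     out = []
--     for n in numbers:
--         s = bin(n)[2:]
--         k = 0
--         while (1 << k) - 1 < len(s):
--             k += 1
--         s = '0' * ((1 << k) - 1 - len(s)) + s
--         out.append(1 if _scan(s)[0] else 0)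
--     return out
-- ===== Notes on version B (the rewrite author's own statement) =====
-- stated objective: alternative
-- what changed: B's tree check is a single bottom-up recursion returning a (valid, has_one) pair, so A's separate "'1' in left/right" substring scans and truthy None fall-through disappear, and the zero-padding to length 2^k-1 is computed arithmetically in one step instead of prepending '0' characters one at a time in a loop.
import Mathlib
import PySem

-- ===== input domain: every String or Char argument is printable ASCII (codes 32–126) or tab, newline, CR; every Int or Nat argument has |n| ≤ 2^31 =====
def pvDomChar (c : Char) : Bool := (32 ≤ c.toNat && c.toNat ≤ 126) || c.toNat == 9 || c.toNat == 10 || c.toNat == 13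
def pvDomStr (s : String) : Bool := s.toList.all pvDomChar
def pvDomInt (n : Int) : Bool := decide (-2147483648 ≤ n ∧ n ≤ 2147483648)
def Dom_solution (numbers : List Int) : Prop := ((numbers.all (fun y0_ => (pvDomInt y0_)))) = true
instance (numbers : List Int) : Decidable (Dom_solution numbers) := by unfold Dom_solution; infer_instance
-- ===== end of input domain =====

-- B replaces A's repeated "'1' in substring" scans by one bottom-up recursion
-- returning a (valid, has_one) pair, and pads arithmetically in one step.

-- shared helper: Python's bin(n)[2:] (used identically by both programs)
def pyBits (n : Nat) : List Char :=
  if n = 0 then [] else pyBits (n / 2) ++ [if n % 2 = 1 then '1' else '0']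
termination_by n
decreasing_by exact Nat.div_lt_self (Nat.pos_of_ne_zero (by assumption)) one_lt_two

def pyBin (n : Int) : List Char :=
  if n < 0 then 'b' :: pyBits (-n).toNat
  else if n = 0 then ['0'] else pyBits n.toNat

-- ===== PORT A =====

-- small facts the recursive ports cite for termination
theorem pv_floordiv_len_two (n : Nat) :
    PySem.Int.floordiv (n : Int) 2 = ((n / 2 : Nat) : Int) := by
  exact_mod_cast PySem.Int.floordiv_natCast n 2

theorem pv_left_len (s : List Char) (h : s ≠ []) :
    (PySem.List.slice s none (some (PySem.Int.floordiv (s.length : Int) 2))).length < s.length := by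
  rw [pv_floordiv_len_two, PySem.List.slice_to_natCast]
  have : s.length ≠ 0 := by simpa using congrArg List.length |>.mt (by intro hh; exact h (List.length_eq_zero_iff.mp hh))
  simp only [List.length_take]
  omega

theorem pv_right_len (s : List Char) (h : s ≠ []) :
    (PySem.List.slice s (some (PySem.Int.floordiv (s.length : Int) 2 + 1)) none).length < s.length := by
  rw [pv_floordiv_len_two]
  have h2 : ((s.length / 2 : Nat) : Int) + 1 = ((s.length / 2 + 1 : Nat) : Int) := by push_cast; ring
  rw [h2, PySem.List.slice_from_natCast]
  have : s.length ≠ 0 := fun hh => h (List.length_eq_zero_iff.mp hh)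
  simp only [List.length_drop]
  omega

def ischeck (n : Int) : Bool := PySem.Int.band n (n - 1) == 0

-- the while-loop of A, with a fuel guard (fuel s.length + 2 always suffices on
-- the lengths reached from `solution`; proved below)
def padA : Nat → List Char → List Char
  | 0, s => s
  | fuel + 1, s => if ischeck ((s.length : Int) + 1) then s else padA fuel ('0' :: s)

-- A's check_str; Python returns True/False/None ⇒ Option Bool (none = falsy
-- fall-through; the IndexError on '' — unreachable from `solution` — is also none)
def checkStr (s : List Char) : Option Bool :=
  if s.length = 1 then some true
  else
    let left := PySem.List.slice s none (some (PySem.Int.floordiv (s.length : Int) 2))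
    let right := PySem.List.slice s (some (PySem.Int.floordiv (s.length : Int) 2 + 1)) none
    if s.length = 3 then
      if s = ['0', '0', '0'] then some true
      else if PySem.List.pyGet? s 1 = some '1' then some true
      else some false
    else if hg : PySem.List.pyGet? s (PySem.Int.floordiv (s.length : Int) 2) = some '1' then
      if checkStr left = some true ∧ checkStr right = some true then some true else some false
    else if PySem.List.pyGet? s (PySem.Int.floordiv (s.length : Int) 2) = some '0' then
      -- '1' not in left and '1' not in right
      if ¬ left.contains '1' ∧ ¬ right.contains '1' then some true else none
    else none
termination_by s.length
decreasing_by
  · exact pv_left_len s (by intro he; subst he; simp [PySem.List.pyGet?] at hg)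
  · exact pv_right_len s (by intro he; subst he; simp [PySem.List.pyGet?] at hg)

def solution (numbers : List Int) : List Int :=
  numbers.foldl (fun answer i =>
    let bin0 := pyBin i
    let bin_num := padA (bin0.length + 2) bin0
    answer ++ [if checkStr bin_num = some true then (1 : Int) else 0]) []

-- ===== PORT B =====

-- single recursion returning (valid, has_one); the IndexError on '' (never
-- reached from `solution_alt`) is the none branch
def scanB (s : List Char) : Bool × Bool :=
  if s.length = 1 then (true, s == ['1'])
  else if s.length = 3 then
    ((s == ['0', '0', '0']) || (PySem.List.pyGet? s 1 == some '1'), s.contains '1')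
  else
    match hg : PySem.List.pyGet? s (PySem.Int.floordiv (s.length : Int) 2) with
    | none => (false, false)
    | some c =>
      let p := scanB (PySem.List.slice s none (some (PySem.Int.floordiv (s.length : Int) 2)))
      let q := scanB (PySem.List.slice s (some (PySem.Int.floordiv (s.length : Int) 2 + 1)) none)
      let v := if c = '1' then p.1 && q.1 else if c = '0' then !p.2 && !q.2 else false
      (v, p.2 || q.2 || c == '1')
termination_by s.length
decreasing_by
  · exact pv_left_len s (by intro he; subst he; simp [PySem.List.pyGet?] at hg)
  · exact pv_right_len s (by intro he; subst he; simp [PySem.List.pyGet?] at hg)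

-- the while loop "k += 1 until (1 << k) - 1 >= len(s)", fuel-guarded
-- (fuel `len` always suffices since k never exceeds len)
def findKAux : Nat → Nat → Nat → Nat
  | 0, _, k => k
  | fuel + 1, len, k => if 2 ^ k - 1 < len then findKAux fuel len (k + 1) else k

def findK (len : Nat) : Nat := findKAux len len 0

def solution_alt (numbers : List Int) : List Int :=
  numbers.foldl (fun out n =>
    let s := pyBin n
    let k := findK s.length
    let s2 := List.replicate (2 ^ k - 1 - s.length) '0' ++ s
    out ++ [if (scanB s2).1 then (1 : Int) else 0]) []

-- ===== PRECONDITION & SPEC =====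
def Spec_solution (numbers : List Int) (out : List Int) : Prop := out = solution_alt numbers
instance (numbers : List Int) (out : List Int) : Decidable (Spec_solution numbers out) := by unfold Spec_solution; infer_instance

-- ===== CLAIM (what is proved, stated in full; the proofs are below) =====
def Claim_equal_solution : Prop := ∀ (numbers : List Int), Dom_solution numbers → Spec_solution numbers (solution numbers)

-- ===== LEMMAS AND PROOFS =====

-- Nat model of A's padding loop (depends only on the length)
def padLen : Nat → Nat → Nat
  | 0, l => l
  | fuel + 1, l => if ischeck ((l : Int) + 1) then l else padLen fuel (l + 1)

theorem padLen_ge (fuel l : Nat) : l ≤ padLen fuel l := by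
  induction fuel generalizing l with
  | zero => simp [padLen]
  | succ n ih =>
    simp only [padLen]
    split
    · exact le_refl l
    · exact le_trans (Nat.le_succ l) (ih (l + 1))

theorem padA_eq (fuel : Nat) (s : List Char) :
    padA fuel s = List.replicate (padLen fuel s.length - s.length) '0' ++ s := by
  induction fuel generalizing s with
  | zero => simp [padA, padLen]
  | succ n ih =>
    simp only [padA, padLen]
    split
    · simp
    · rw [ih ('0' :: s)]
      simp only [List.length_cons]
      have h1 : s.length + 1 ≤ padLen n (s.length + 1) := padLen_ge n _
      rw [show padLen n (s.length + 1) - s.length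
            = (padLen n (s.length + 1) - (s.length + 1)) + 1 by omega,
          List.replicate_succ', List.append_assoc, List.singleton_append]

theorem pad_agree : ∀ l < 34, 1 ≤ l → padLen (l + 2) l = 2 ^ findK l - 1 := by decide

theorem pyBits_len_le : ∀ k n : Nat, n < 2 ^ k → (pyBits n).length ≤ k := by
  intro k
  induction k with
  | zero => intro n h; interval_cases n; simp [pyBits]
  | succ k ih =>
    intro n h
    by_cases h0 : n = 0
    · subst h0; simp [pyBits]
    · rw [pyBits, if_neg h0]
      have : n / 2 < 2 ^ k := by
        have : 2 ^ (k + 1) = 2 ^ k * 2 := by ring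
        omega
      have := ih (n / 2) this
      simp only [List.length_append, List.length_singleton]
      omega

theorem pyBits_len_pos (n : Nat) (h : n ≠ 0) : 1 ≤ (pyBits n).length := by
  rw [pyBits, if_neg h]; simp

theorem pyBin_len_pos (n : Int) : 1 ≤ (pyBin n).length := by
  unfold pyBin
  split
  · simp
  · split
    · simp
    · exact pyBits_len_pos _ (by omega)

theorem pyBin_len_le (n : Int) (h1 : -2147483648 ≤ n) (h2 : n ≤ 2147483648) :
    (pyBin n).length ≤ 33 := by
  unfold pyBin
  split
  · have : (-n).toNat < 2 ^ 32 := by omega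
    have := pyBits_len_le 32 (-n).toNat this
    simp only [List.length_cons]
    omega
  · split
    · simp
    · have : n.toNat < 2 ^ 32 := by omega
      have := pyBits_len_le 32 n.toNat this
      omega

-- the key invariant: B's pair recursion computes (truthiness of A's check_str, "'1' in s")
theorem scan_spec : ∀ s : List Char,
    (scanB s).1 = (checkStr s == some true) ∧ (scanB s).2 = s.contains '1' := by
  have key : ∀ (n : Nat) (s : List Char), s.length = n →
      (scanB s).1 = (checkStr s == some true) ∧ (scanB s).2 = s.contains '1' := by
    intro n
    induction n using Nat.strong_induction_on with
    | _ n ih =>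
    intro s hs
    subst hs
    by_cases h1 : s.length = 1
    · match s, h1 with
      | [c], _ =>
        rw [scanB, checkStr]
        constructor
        · simp
        · by_cases hc : c = '1'
          · simp [hc]
          · simp [hc, Ne.symm hc]
    · by_cases h3 : s.length = 3
      · match s, h3 with
        | [a, b, c], _ =>
          rw [scanB, checkStr]
          constructor
          · by_cases h0 : ([a, b, c] : List Char) = ['0', '0', '0'] <;>
              by_cases hb : b = '1' <;>
              simp [h0, hb, PySem.List.pyGet?, PySem.List.pyIdx?] <;>
              (intro ha hb' hc'; exact h0 (by simp [ha, hb', hc']))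
          · simp
      · cases hget : PySem.List.pyGet? s (PySem.Int.floordiv (s.length : Int) 2) with
        | none =>
          have hnil : s = [] := by
            by_contra hne
            have hlen : 0 < s.length := List.length_pos_iff.mpr hne
            rw [pv_floordiv_len_two] at hget
            rw [PySem.List.pyGet?_natCast] at hget
            have : s.length / 2 < s.length := by omega
            simp [List.getElem?_eq_some_iff, this] at hget
          subst hnil
          rw [scanB, checkStr]
          simp [PySem.List.pyGet?, PySem.List.pyIdx?]
        | some c =>
          have hne : s ≠ [] := by
            intro he; subst he; simp [PySem.List.pyGet?] at hget
          have hlen2 : 2 ≤ s.length := by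
            have : 0 < s.length := List.length_pos_iff.mpr hne
            omega
          have hmlt : s.length / 2 < s.length := by omega
          have hL : PySem.List.slice s none (some (PySem.Int.floordiv (s.length : Int) 2))
              = s.take (s.length / 2) := by
            rw [pv_floordiv_len_two, PySem.List.slice_to_natCast]
          have hR : PySem.List.slice s (some (PySem.Int.floordiv (s.length : Int) 2 + 1)) none
              = s.drop (s.length / 2 + 1) := by
            rw [pv_floordiv_len_two,
                show ((s.length / 2 : Nat) : Int) + 1 = ((s.length / 2 + 1 : Nat) : Int) by push_cast; ring,
                PySem.List.slice_from_natCast]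
          have hgc : s[s.length / 2]? = some c := by
            rw [pv_floordiv_len_two, PySem.List.pyGet?_natCast] at hget
            exact hget
          have hLlen : (s.take (s.length / 2)).length < s.length := by
            simp only [List.length_take]; omega
          have hRlen : (s.drop (s.length / 2 + 1)).length < s.length := by
            simp only [List.length_drop]; omega
          obtain ⟨ihL1, ihL2⟩ := ih _ hLlen (s.take (s.length / 2)) rfl
          obtain ⟨ihR1, ihR2⟩ := ih _ hRlen (s.drop (s.length / 2 + 1)) rfl
          have hsplit : s = s.take (s.length / 2) ++ c :: s.drop (s.length / 2 + 1) := by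
            conv_lhs => rw [← List.take_append_drop (s.length / 2) s]
            rw [List.drop_eq_getElem_cons hmlt]
            rw [List.getElem?_eq_some_iff] at hgc
            obtain ⟨hh, hgc⟩ := hgc
            rw [hgc]
          have hscan : scanB s =
              (if c = '1' then
                  (scanB (s.take (s.length / 2))).1 && (scanB (s.drop (s.length / 2 + 1))).1
                else if c = '0' then
                  !(scanB (s.take (s.length / 2))).2 && !(scanB (s.drop (s.length / 2 + 1))).2
                else false,
                (scanB (s.take (s.length / 2))).2 || (scanB (s.drop (s.length / 2 + 1))).2
                  || (c == '1')) := by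
            rw [scanB]
            simp only [if_neg h1, if_neg h3, hL, hR]
            split
            · rename_i heq
              rw [hget] at heq; cases heq
            · rename_i c' heq
              rw [hget] at heq
              injection heq with h'
              subst h'
              rfl
          have hcontains : s.contains '1'
              = ((s.take (s.length / 2)).contains '1' || (c == '1')
                  || (s.drop (s.length / 2 + 1)).contains '1') := by
            by_cases hc : c = '1'
            · conv_lhs => rw [hsplit]
              simp [hc, List.contains_append, Bool.or_comm, Bool.or_left_comm, Bool.or_assoc]
            · conv_lhs => rw [hsplit]
              simp [hc, Ne.symm hc, List.contains_append, Bool.or_comm, Bool.or_left_comm,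
                Bool.or_assoc]
          constructor
          · rw [hscan]
            rw [checkStr]
            simp only [if_neg h1, if_neg h3, hL, hR, hget, Option.some.injEq]
            by_cases c1 : c = '1'
            · simp only [c1, if_pos rfl, if_pos trivial]
              simp only [ihL1, ihR1]
              by_cases hA : checkStr (s.take (s.length / 2)) = some true <;>
                by_cases hB : checkStr (s.drop (s.length / 2 + 1)) = some true <;>
                simp [hA, hB]
            · by_cases c0 : c = '0'
              · simp only [c0, if_neg c1]
                simp only [ihL2, ihR2]
                by_cases hA : '1' ∈ s.take (s.length / 2) <;>
                  by_cases hB : '1' ∈ s.drop (s.length / 2 + 1) <;>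
                  simp [hA, hB, c1, c0]
              · simp [c1, c0]
          · rw [hscan]
            simp only [ihL2, ihR2]
            rw [hcontains]
            simp [Bool.or_comm, Bool.or_left_comm, Bool.or_assoc]
  exact fun s => key s.length s rfl

theorem elem_eq (i : Int) (h1 : -2147483648 ≤ i) (h2 : i ≤ 2147483648) :
    (if checkStr (padA ((pyBin i).length + 2) (pyBin i)) = some true then (1 : Int) else 0)
    = (if (scanB (List.replicate (2 ^ findK (pyBin i).length - 1 - (pyBin i).length) '0'
          ++ pyBin i)).1 then (1 : Int) else 0) := by
  have hl1 : 1 ≤ (pyBin i).length := pyBin_len_pos i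
  have hl2 : (pyBin i).length ≤ 33 := pyBin_len_le i h1 h2
  rw [padA_eq, pad_agree (pyBin i).length (by omega) hl1]
  set s2 := List.replicate (2 ^ findK (pyBin i).length - 1 - (pyBin i).length) '0' ++ pyBin i
  have hs := (scan_spec s2).1
  by_cases hc : checkStr s2 = some true
  · rw [if_pos hc]
    have : (scanB s2).1 = true := by rw [hs, hc]; rfl
    rw [this]; rfl
  · rw [if_neg hc]
    have : (scanB s2).1 = false := by
      rw [hs]; simpa [beq_iff_eq] using hc
    rw [this]; rfl

-- ===== VERDICT (by name: the statement is the Claim_ definition above) =====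
-- peeling the head element off A's and B's accumulator folds
theorem fold_tail (acc : List Int) (xs : List Int) :
    xs.foldl (fun answer i =>
      let bin0 := pyBin i
      let bin_num := padA (bin0.length + 2) bin0
      answer ++ [if checkStr bin_num = some true then (1 : Int) else 0]) acc
    = acc ++ xs.foldl (fun answer i =>
      let bin0 := pyBin i
      let bin_num := padA (bin0.length + 2) bin0
      answer ++ [if checkStr bin_num = some true then (1 : Int) else 0]) [] := by
  induction xs generalizing acc with
  | nil => simp
  | cons y ys ih =>
    simp only [List.foldl_cons]
    rw [ih, ih ([] ++ _)]
    simp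

theorem fold_tail_alt (acc : List Int) (xs : List Int) :
    xs.foldl (fun out n =>
      let s := pyBin n
      let k := findK s.length
      let s2 := List.replicate (2 ^ k - 1 - s.length) '0' ++ s
      out ++ [if (scanB s2).1 then (1 : Int) else 0]) acc
    = acc ++ xs.foldl (fun out n =>
      let s := pyBin n
      let k := findK s.length
      let s2 := List.replicate (2 ^ k - 1 - s.length) '0' ++ s
      out ++ [if (scanB s2).1 then (1 : Int) else 0]) [] := by
  induction xs generalizing acc with
  | nil => simp
  | cons y ys ih =>
    simp only [List.foldl_cons]
    rw [ih, ih ([] ++ _)]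
    simp

theorem solution_spec : Claim_equal_solution := by
  intro numbers hdom
  unfold Spec_solution solution solution_alt
  have hdom' : ∀ i ∈ numbers, -2147483648 ≤ i ∧ i ≤ 2147483648 := by
    intro i hi
    have := (List.all_eq_true.mp hdom) i hi
    simpa [pvDomInt] using this
  clear hdom
  induction numbers with
  | nil => rfl
  | cons x xs ih =>
    have hx := hdom' x (by simp)
    have hxs : ∀ i ∈ xs, -2147483648 ≤ i ∧ i ≤ 2147483648 := fun i hi =>
      hdom' i (List.mem_cons_of_mem _ hi)
    simp only [List.foldl_cons]
    rw [fold_tail, fold_tail_alt, ih hxs]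
    have hstep :
        (let bin0 := pyBin x;
         let bin_num := padA (bin0.length + 2) bin0;
         ([] : List Int) ++ [if checkStr bin_num = some true then (1 : Int) else 0])
        = (let s := pyBin x;
           let k := findK s.length;
           let s2 := List.replicate (2 ^ k - 1 - s.length) '0' ++ s;
           ([] : List Int) ++ [if (scanB s2).1 then (1 : Int) else 0]) := by
      simp only []
      rw [elem_eq x hx.1 hx.2]
    rw [hstep]
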